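-- pv_equiv track=rewrite | github.com/samueljeong/youtube-automation | scripts/history_pipeline/script_generator.py | _format_materials_for_youtube
-- ===== SOURCE A (Python) =====
-- def _format_materials_for_youtube(materials: list) -> str:
--     """
--     수집된 자료를 YouTube 설명란용 형식으로 변환 (제목 + 설명 포함)
--
--     Args:
--         materials: 수집된 자료 리스트
--             각 material: {title, url, content, source_name, source_type}
--
--     Returns:
--         보기 좋은 출처 목록
--     """
--     if not materials:
--         return ""
--
--     lines = ["📚 참고 자료 및 출처", ""]
--
--     # 출처별 분류
--     categorized = {
--         "encyclopedia": [],  # 한국민족문화대백과사전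
--         "grounding": [],     # Gemini Search
--         "museum": [],        # 국립중앙박물관
--         "archive": [],       # 국사편찬위원회
--         "heritage": [],      # 문화재청
--         "other": [],
--     }
--
--     for m in materials:
--         source_type = m.get("source_type", "other")
--         url = m.get("url", "")
--
--         # URL 기반 분류 보정
--         if url:
--             url_lower = url.lower()
--             if "encykorea" in url_lower:
--                 source_type = "encyclopedia"
--             elif "museum.go.kr" in url_lower:
--                 source_type = "museum"
--             elif "db.history.go.kr" in url_lower:
--                 source_type = "archive"
--             elif "heritage.go.kr" in url_lower:
--                 source_type = "heritage"
--
--         if source_type in categorized: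
--             categorized[source_type].append(m)
--         else:
--             categorized["other"].append(m)
--
--     # 카테고리별 출력 (제목 + 내용 요약 포함)
--     category_names = {
--         "encyclopedia": "▸ 한국민족문화대백과사전",
--         "grounding": "▸ 학술 자료 (Google Search)",
--         "museum": "▸ 국립중앙박물관",
--         "archive": "▸ 국사편찬위원회 한국사DB",
--         "heritage": "▸ 문화재청 국가문화유산포털",
--         "other": "▸ 기타 참고 자료",
--     }
--
--     for cat_key, cat_name in category_names.items():
--         cat_materials = categorized.get(cat_key, [])
--         if not cat_materials:
--             continue
--
--         lines.append(cat_name)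
--
--         for m in cat_materials[:3]:  # 카테고리당 최대 3개
--             title = m.get("title", "").strip()
--             url = m.get("url", "").strip()
--             content = m.get("content", "").strip()
--
--             # 제목이 없으면 content에서 추출
--             if not title and content:
--                 # content 첫 줄에서 제목 추출 시도
--                 first_line = content.split("\n")[0][:50]
--                 title = first_line.strip("[]").strip()
--
--             # 출력 형식: 제목 + URL (깔끔하게)
--             if title:
--                 lines.append(f"  • {title}")
--                 if url and not url.startswith("http://vertexaisearch"):
--                     # Vertex AI redirect URL은 표시 안함 (보기 안좋음)
--                     lines.append(f"    {url}")
--             elif url and not url.startswith("http://vertexaisearch"):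
--                 lines.append(f"  {url}")
--
--         lines.append("")
--
--     return "\n".join(lines)
-- ===== SOURCE B (Python) =====
-- def _format_materials_for_youtube(materials: list) -> str:
--     if not materials:
--         return ""
--
--     def classify(m):
--         cat = m.get("source_type", "other")
--         url = m.get("url", "").lower()
--         if url:
--             if "encykorea" in url:
--                 cat = "encyclopedia"
--             elif "museum.go.kr" in url:
--                 cat = "museum"
--             elif "db.history.go.kr" in url:
--                 cat = "archive"
--             elif "heritage.go.kr" in url:
--                 cat = "heritage"
--         if cat not in ("encyclopedia", "grounding", "museum", "archive", "heritage"):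
--             cat = "other"
--         return cat
--
--     def entry_lines(m):
--         title = m.get("title", "").strip()
--         url = m.get("url", "").strip()
--         content = m.get("content", "").strip()
--         if not title and content:
--             title = content.split("\n")[0][:50].strip("[]").strip()
--         show_url = url and not url.startswith("http://vertexaisearch")
--         if title:
--             return [f"  • {title}"] + ([f"    {url}"] if show_url else [])
--         return [f"  {url}"] if show_url else []
--
--     lines = ["📚 참고 자료 및 출처", ""]
--     for cat_key, cat_name in [
--         ("encyclopedia", "▸ 한국민족문화대백과사전"),
--         ("grounding", "▸ 학술 자료 (Google Search)"),
--         ("museum", "▸ 국립중앙박물관"),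
--         ("archive", "▸ 국사편찬위원회 한국사DB"),
--         ("heritage", "▸ 문화재청 국가문화유산포털"),
--         ("other", "▸ 기타 참고 자료"),
--     ]:
--         group = [m for m in materials if classify(m) == cat_key][:3]
--         if group:
--             lines.append(cat_name)
--             for m in group:
--                 lines.extend(entry_lines(m))
--             lines.append("")
--     return "\n".join(lines)
-- ===== Notes on version B (the rewrite author's own statement) =====
-- stated objective: alternative
-- what changed: Extracted a classify(m) helper and replaced A's single bucketing pass into a six-key dict with a per-category rescan of the materials list (filter by classify, take 3, emit), keeping the per-entry formatting unchanged.
import Mathlib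
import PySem

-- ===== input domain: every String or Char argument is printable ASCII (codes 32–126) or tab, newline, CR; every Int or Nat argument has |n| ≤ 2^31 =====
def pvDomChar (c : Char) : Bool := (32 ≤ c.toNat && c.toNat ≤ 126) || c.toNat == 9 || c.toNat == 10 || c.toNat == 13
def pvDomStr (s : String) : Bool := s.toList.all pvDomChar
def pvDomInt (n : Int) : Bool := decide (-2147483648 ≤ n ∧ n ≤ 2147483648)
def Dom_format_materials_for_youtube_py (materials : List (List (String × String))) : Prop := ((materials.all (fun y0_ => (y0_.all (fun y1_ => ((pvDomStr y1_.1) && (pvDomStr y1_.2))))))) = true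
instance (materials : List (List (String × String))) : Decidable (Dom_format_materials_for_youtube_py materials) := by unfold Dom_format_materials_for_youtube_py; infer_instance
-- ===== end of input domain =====

-- B replaces A's "bucket all materials into a dict, then emit" with a classify
-- helper and a per-category rescan of the materials list (different decomposition,
-- same cost class); the per-entry formatting code is unchanged between the two.

-- shared helpers: code that is literally identical in both Pythons
-- m.get(k, d) on a material dict
def mget (m : List (String × String)) (k d : String) : String :=
  PySem.Dict.getD (PySem.Dict.ofList m) k d

-- the URL-corrected source type (A computes it inline in its bucketing loop,
-- B computes it at the top of classify; the code is character-identical)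
def rawSourceType (m : List (String × String)) : String :=
  let st := mget m "source_type" "other"
  let url := mget m "url" ""
  if url ≠ "" then
    let ul := PySem.Str.lower url
    if PySem.Str.isIn "encykorea" ul then "encyclopedia"
    else if PySem.Str.isIn "museum.go.kr" ul then "museum"
    else if PySem.Str.isIn "db.history.go.kr" ul then "archive"
    else if PySem.Str.isIn "heritage.go.kr" ul then "heritage"
    else st
  else st

-- title/url extraction per material (identical in both Pythons)
def titleUrl (m : List (String × String)) : String × String :=
  let title := PySem.Str.strip (mget m "title" "")
  let url := PySem.Str.strip (mget m "url" "")
  let content := PySem.Str.strip (mget m "content" "")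
  let title :=
    if title = "" ∧ content ≠ "" then
      -- first_line = content.split("\n")[0][:50]; title = first_line.strip("[]").strip()
      PySem.Str.strip (PySem.Str.stripChars
        (PySem.Str.slice (((PySem.Str.split? content "\n").getD []).headD "") none (some 50)) "[]")
    else title
  (title, url)

-- category_names, an insertion-ordered dict literal in both Pythons
def catPairs : List (String × String) :=
  [("encyclopedia", "▸ 한국민족문화대백과사전"),
   ("grounding", "▸ 학술 자료 (Google Search)"),
   ("museum", "▸ 국립중앙박물관"),
   ("archive", "▸ 국사편찬위원회 한국사DB"),
   ("heritage", "▸ 문화재청 국가문화유산포털"),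
   ("other", "▸ 기타 참고 자료")]

-- ===== PORT A =====
-- the 'categorized' dict: fixed six keys, so a six-field record of its lists
structure CatsA where
  enc : List (List (String × String))
  gro : List (List (String × String))
  mus : List (List (String × String))
  arc : List (List (String × String))
  her : List (List (String × String))
  oth : List (List (String × String))
deriving Repr

-- one iteration of A's bucketing loop: 'if source_type in categorized: … else other'
def catStep (c : CatsA) (m : List (String × String)) : CatsA :=
  let st := rawSourceType m
  if st = "encyclopedia" then { c with enc := c.enc ++ [m] }
  else if st = "grounding" then { c with gro := c.gro ++ [m] }
  else if st = "museum" then { c with mus := c.mus ++ [m] }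
  else if st = "archive" then { c with arc := c.arc ++ [m] }
  else if st = "heritage" then { c with her := c.her ++ [m] }
  else if st = "other" then { c with oth := c.oth ++ [m] }
  else { c with oth := c.oth ++ [m] }

-- categorized.get(cat_key, [])
def catGet (c : CatsA) (k : String) : List (List (String × String)) :=
  if k = "encyclopedia" then c.enc
  else if k = "grounding" then c.gro
  else if k = "museum" then c.mus
  else if k = "archive" then c.arc
  else if k = "heritage" then c.her
  else if k = "other" then c.oth
  else []

-- A's per-material output: append the title line, then conditionally the url line
def emitOneA (lines : List (String)) (m : List (String × String)) : List String :=
  let tu := titleUrl m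
  let title := tu.1
  let url := tu.2
  if title ≠ "" then
    let lines := lines ++ ["  • " ++ title]
    if url ≠ "" ∧ ¬ PySem.Str.startswith url "http://vertexaisearch" then
      lines ++ ["    " ++ url]
    else lines
  else if url ≠ "" ∧ ¬ PySem.Str.startswith url "http://vertexaisearch" then
    lines ++ ["  " ++ url]
  else lines

-- A's per-category output step
def emitCatA (cats : CatsA) (lines : List String) (p : String × String) : List String :=
  let cm := catGet cats p.1
  if cm = [] then lines
  else
    let lines := lines ++ [p.2]
    let lines := (cm.take 3).foldl emitOneA lines
    lines ++ [""]

def format_materials_for_youtube_py (materials : List (List (String × String))) : String :=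
  if materials = [] then ""
  else
    let cats := materials.foldl catStep ⟨[], [], [], [], [], []⟩
    let lines := catPairs.foldl (emitCatA cats) ["📚 참고 자료 및 출처", ""]
    PySem.Str.join "\n" lines

-- ===== PORT B =====
-- classify(m): raw source type, unknown keys mapped to "other"
def classify (m : List (String × String)) : String :=
  let cat := rawSourceType m
  if cat = "encyclopedia" ∨ cat = "grounding" ∨ cat = "museum" ∨
     cat = "archive" ∨ cat = "heritage" then cat
  else "other"

-- entry_lines(m): the lines for one material, as a list
def entryLines (m : List (String × String)) : List String :=
  let tu := titleUrl m
  let title := tu.1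
  let url := tu.2
  if title ≠ "" then
    ["  • " ++ title] ++
      (if url ≠ "" ∧ ¬ PySem.Str.startswith url "http://vertexaisearch" then
        ["    " ++ url] else [])
  else if url ≠ "" ∧ ¬ PySem.Str.startswith url "http://vertexaisearch" then
    ["  " ++ url]
  else []

-- B's per-category step: rescan materials, filter by classify, take 3, extend
def emitCatB (materials : List (List (String × String)))
    (lines : List String) (p : String × String) : List String :=
  let group := (materials.filter (fun m => classify m == p.1)).take 3
  if group = [] then lines
  else
    (group.foldl (fun l m => l ++ entryLines m) (lines ++ [p.2])) ++ [""]

def format_materials_for_youtube_py_alt (materials : List (List (String × String))) : String :=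
  if materials = [] then ""
  else
    let lines := catPairs.foldl (emitCatB materials) ["📚 참고 자료 및 출처", ""]
    PySem.Str.join "\n" lines

-- ===== PRECONDITION & SPEC =====
def Spec_format_materials_for_youtube_py (materials : List (List (String × String))) (out : String) : Prop := out = format_materials_for_youtube_py_alt materials
instance (materials : List (List (String × String))) (out : String) : Decidable (Spec_format_materials_for_youtube_py materials out) := by unfold Spec_format_materials_for_youtube_py; infer_instance

-- ===== CLAIM (what is proved, stated in full; the proofs are below) =====
def Claim_equal_format_materials_for_youtube_py : Prop := ∀ (materials : List (List (String × String))), Dom_format_materials_for_youtube_py materials → Spec_format_materials_for_youtube_py materials (format_materials_for_youtube_py materials)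

-- ===== LEMMAS AND PROOFS =====

lemma emitOneA_eq (lines : List String) (m : List (String × String)) :
    emitOneA lines m = lines ++ entryLines m := by
  simp only [emitOneA, entryLines]
  split_ifs <;> simp

lemma catGet_catStep (c : CatsA) (m : List (String × String)) (k : String)
    (hk : k = "encyclopedia" ∨ k = "grounding" ∨ k = "museum" ∨ k = "archive" ∨
          k = "heritage" ∨ k = "other") :
    catGet (catStep c m) k = catGet c k ++ (if classify m == k then [m] else []) := by
  unfold catStep classify catGet
  by_cases h1 : rawSourceType m = "encyclopedia"
  · rcases hk with rfl|rfl|rfl|rfl|rfl|rfl <;> simp [h1]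
  by_cases h2 : rawSourceType m = "grounding"
  · rcases hk with rfl|rfl|rfl|rfl|rfl|rfl <;> simp [h2]
  by_cases h3 : rawSourceType m = "museum"
  · rcases hk with rfl|rfl|rfl|rfl|rfl|rfl <;> simp [h3]
  by_cases h4 : rawSourceType m = "archive"
  · rcases hk with rfl|rfl|rfl|rfl|rfl|rfl <;> simp [h4]
  by_cases h5 : rawSourceType m = "heritage"
  · rcases hk with rfl|rfl|rfl|rfl|rfl|rfl <;> simp [h5]
  by_cases h6 : rawSourceType m = "other"
  · rcases hk with rfl|rfl|rfl|rfl|rfl|rfl <;> simp [h6]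
  · rcases hk with rfl|rfl|rfl|rfl|rfl|rfl <;> simp [h1, h2, h3, h4, h5, h6]

lemma bucket_eq (ms : List (List (String × String))) (c : CatsA) (k : String)
    (hk : k = "encyclopedia" ∨ k = "grounding" ∨ k = "museum" ∨ k = "archive" ∨
          k = "heritage" ∨ k = "other") :
    catGet (ms.foldl catStep c) k = catGet c k ++ ms.filter (fun m => classify m == k) := by
  induction ms generalizing c with
  | nil => simp
  | cons m ms ih =>
      simp only [List.foldl_cons, List.filter_cons]
      rw [ih, catGet_catStep c m k hk]
      split_ifs <;> simp_all

lemma emitCat_eq (materials : List (List (String × String)))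
    (lines : List String) (p : String × String) (hp : p ∈ catPairs) :
    emitCatA (materials.foldl catStep ⟨[], [], [], [], [], []⟩) lines p
      = emitCatB materials lines p := by
  have hk : p.1 = "encyclopedia" ∨ p.1 = "grounding" ∨ p.1 = "museum" ∨ p.1 = "archive" ∨
      p.1 = "heritage" ∨ p.1 = "other" := by
    simp only [catPairs, List.mem_cons, List.not_mem_nil, or_false] at hp
    rcases hp with rfl|rfl|rfl|rfl|rfl|rfl <;> simp
  have hb := bucket_eq materials ⟨[], [], [], [], [], []⟩ p.1 hk
  have hinit : catGet ⟨[], [], [], [], [], []⟩ p.1 = [] := by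
    simp only [catGet]; split_ifs <;> rfl
  rw [hinit, List.nil_append] at hb
  simp only [emitCatA, emitCatB, hb]
  by_cases h : materials.filter (fun m => classify m == p.1) = []
  · simp [h]
  · have h3 : (materials.filter (fun m => classify m == p.1)).take 3 ≠ [] := by
      simp [List.take_eq_nil_iff, h]
    rw [if_neg h, if_neg h3]
    have he : emitOneA = fun (l : List String) m => l ++ entryLines m := by
      funext l m; exact emitOneA_eq l m
    rw [he]

-- ===== VERDICT (by name: the statement is the Claim_ definition above) =====
theorem format_materials_for_youtube_py_spec : Claim_equal_format_materials_for_youtube_py := by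
  intro materials _
  unfold Spec_format_materials_for_youtube_py
  unfold format_materials_for_youtube_py format_materials_for_youtube_py_alt
  by_cases h : materials = []
  · simp [h]
  · rw [if_neg h, if_neg h]
    exact congrArg (PySem.Str.join "\n")
      (PySem.List.foldl_congr_mem catPairs _ _ _
        (fun lines p hp => emitCat_eq materials lines p hp))
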